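-- pv_equiv track=rewrite | github.com/jjiwoning/Code_Test | python_algo/Programmers/best_set.py | solution
-- ===== SOURCE A (Python) =====
-- def solution(n, s):
--     answer = []
--     if n > s:
--         return [-1]
--     find = s // n
--     for i in range(n):
--         answer.append(find)
--     idx = n - 1
--     for _ in range(s % n):
--         answer[idx] += 1
--         idx -= 1
--     return answer
-- ===== SOURCE B (Python) =====
-- def solution(n, s):
--     if n > s:
--         return [-1]
--     answer = []
--     rem, k = s, n
--     while k > 0:
--         v = rem // k
--         answer.append(v)
--         rem -= v
--         k -= 1
--     return answer
-- ===== Notes on version B (the rewrite author's own statement) =====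
-- stated objective: alternative
-- what changed: Replaces A's global s//n fill plus back-to-front increment of the last s%n slots by a single greedy pass that emits remaining_sum // remaining_parts and subtracts it, never computing s%n or revisiting elements.
import Mathlib
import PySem

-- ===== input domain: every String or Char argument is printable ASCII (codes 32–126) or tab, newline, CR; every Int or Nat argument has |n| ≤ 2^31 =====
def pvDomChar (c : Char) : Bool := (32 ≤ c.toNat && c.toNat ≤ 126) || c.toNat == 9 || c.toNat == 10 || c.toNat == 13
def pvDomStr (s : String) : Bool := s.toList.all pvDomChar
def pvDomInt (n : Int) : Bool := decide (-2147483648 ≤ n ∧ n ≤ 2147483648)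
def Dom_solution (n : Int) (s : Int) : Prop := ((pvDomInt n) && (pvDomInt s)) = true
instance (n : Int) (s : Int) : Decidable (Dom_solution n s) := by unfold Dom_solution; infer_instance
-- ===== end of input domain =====

-- B replaces A's fill-with-s//n loop plus back-to-front increment of the last s%n
-- slots by a single greedy pass emitting remaining//parts_left and subtracting.


-- ===== PORT A =====
-- the second Python loop: for _ in range(s % n): answer[idx] += 1; idx -= 1
def incLoop : List Int → Int → Nat → List Int
  | ans, _,   0     => ans
  | ans, idx, k + 1 =>
      incLoop (ans.set idx.toNat ((ans.getD idx.toNat 0) + 1)) (idx - 1) k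

def solution (n : Int) (s : Int) : List Int :=
  if n > s then [-1]
  else
    let find := PySem.Int.floordiv s n
    let answer := (PySem.List.pyRange 0 n 1).foldl (fun acc _ => acc ++ [find]) []
    incLoop answer (n - 1) (PySem.Int.mod s n).toNat

-- ===== PORT B =====
-- the Python while loop: while k > 0: v = rem // k; answer.append(v); rem -= v; k -= 1
def greedyLoop (ans : List Int) (rem k : Int) : List Int :=
  if h : 0 < k then
    let v := PySem.Int.floordiv rem k
    greedyLoop (ans ++ [v]) (rem - v) (k - 1)
  else ans
termination_by k.toNat
decreasing_by omega

def solution_alt (n : Int) (s : Int) : List Int :=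
  if n > s then [-1]
  else greedyLoop [] s n

-- ===== PRECONDITION & SPEC =====
-- Pre_ excludes exactly the inputs where A raises ZeroDivisionError:
-- n = 0 with s ≥ 0 (when s < 0 the n > s guard returns [-1] before the division).
def Pre_solution (n : Int) (s : Int) : Prop := n ≠ 0 ∨ s < 0
instance (n : Int) (s : Int) : Decidable (Pre_solution n s) := by unfold Pre_solution; infer_instance
def pvWitness_solution : Int × Int := (3, 7)

def Spec_solution (n : Int) (s : Int) (out : List Int) : Prop := out = solution_alt n s
instance (n : Int) (s : Int) (out : List Int) : Decidable (Spec_solution n s out) := by unfold Spec_solution; infer_instance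

-- ===== CLAIM (what is proved, stated in full; the proofs are below) =====
def Claim_equal_solution : Prop := ∀ (n : Int) (s : Int), Dom_solution n s → Pre_solution n s → Spec_solution n s (solution n s)

-- ===== LEMMAS AND PROOFS =====

-- appending a constant element once per list item is List.replicate
theorem foldl_append_const (v : Int) (l : List Int) (acc : List Int) :
    l.foldl (fun acc _ => acc ++ [v]) acc = acc ++ List.replicate l.length v := by
  induction l generalizing acc with
  | nil => simp
  | cons x xs ih => simp [List.foldl, ih, List.replicate_succ]

theorem rep_getD (a : Nat) (q : Int) (L : List Int) (h : 1 ≤ a) :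
    (List.replicate a q ++ L).getD (a - 1) 0 = q := by
  induction a with
  | zero => omega
  | succ a ih =>
    rcases Nat.eq_zero_or_pos a with ha | ha
    · subst ha; simp
    · have : a + 1 - 1 = (a - 1) + 1 := by omega
      simpa [List.replicate_succ, this] using ih ha

theorem rep_set (a : Nat) (q v : Int) (L : List Int) (h : 1 ≤ a) :
    (List.replicate a q ++ L).set (a - 1) v = List.replicate (a - 1) q ++ v :: L := by
  induction a with
  | zero => omega
  | succ a ih =>
    rcases Nat.eq_zero_or_pos a with ha | ha
    · subst ha; simp
    · have h1 : a + 1 - 1 = (a - 1) + 1 := by omega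
      have h2 : a = (a - 1) + 1 := by omega
      calc (List.replicate (a+1) q ++ L).set (a+1-1) v
          = q :: (List.replicate a q ++ L).set (a-1) v := by
            rw [h1, List.replicate_succ]; rfl
        _ = q :: (List.replicate (a-1) q ++ v :: L) := by rw [ih ha]
        _ = List.replicate a q ++ v :: L := by
            conv_rhs => rw [h2, List.replicate_succ]
            rw [List.cons_append]

theorem incLoop_spec (k : Nat) : ∀ (a b : Nat) (q : Int), k ≤ a →
    incLoop (List.replicate a q ++ List.replicate b (q + 1)) ((a : Int) - 1) k
      = List.replicate (a - k) q ++ List.replicate (b + k) (q + 1) := by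
  induction k with
  | zero => intro a b q _; simp [incLoop]
  | succ k ih =>
    intro a b q hk
    have ha : 1 ≤ a := by omega
    have htn : ((a : Int) - 1).toNat = a - 1 := by omega
    rw [incLoop, htn, rep_getD a q _ ha, rep_set a q _ _ ha]
    have hcons : (q + 1) :: List.replicate b (q + 1) = List.replicate (b + 1) (q + 1) := by
      rw [List.replicate_succ]
    have hidx : (a : Int) - 1 - 1 = ((a - 1 : Nat) : Int) - 1 := by omega
    rw [hcons, hidx, ih (a - 1) (b + 1) q (by omega)]
    congr 1 <;> congr 1 <;> omega

-- A's value, in two-block closed form, for 0 < n ≤ s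
theorem solution_twoBlock (n s : Int) (hn : 0 < n) (hns : ¬ n > s) :
    solution n s = List.replicate (n - PySem.Int.mod s n).toNat (PySem.Int.floordiv s n)
      ++ List.replicate (PySem.Int.mod s n).toNat (PySem.Int.floordiv s n + 1) := by
  have hr0 : 0 ≤ PySem.Int.mod s n := PySem.Int.mod_nonneg s hn
  have hrn : PySem.Int.mod s n < n := PySem.Int.mod_lt s hn
  unfold solution
  rw [if_neg hns]
  set q := PySem.Int.floordiv s n with hq
  set r := PySem.Int.mod s n with hrdef
  show incLoop ((PySem.List.pyRange 0 n 1).foldl (fun acc _ => acc ++ [q]) []) (n - 1) r.toNat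
      = List.replicate (n - r).toNat q ++ List.replicate r.toNat (q + 1)
  rw [foldl_append_const, PySem.List.length_pyRange_one, List.nil_append]
  have hrep : List.replicate (n - 0).toNat q
      = List.replicate (n - 0).toNat q ++ List.replicate 0 (q + 1) := by simp
  rw [hrep]
  have hlen : ((n - 0).toNat : Int) - 1 = n - 1 := by omega
  rw [← hlen, incLoop_spec r.toNat (n - 0).toNat 0 q (by omega)]
  have h1 : (n - 0).toNat - r.toNat = (n - r).toNat := by omega
  have h2 : 0 + r.toNat = r.toNat := by omega
  rw [h1, h2]

-- the greedy loop produces the same two blocks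
theorem greedy_spec (m : Nat) : ∀ (ans : List Int) (rem k : Int), k = (m : Int) + 1 →
    greedyLoop ans rem k
      = ans ++ List.replicate (k - PySem.Int.mod rem k).toNat (PySem.Int.floordiv rem k)
            ++ List.replicate (PySem.Int.mod rem k).toNat (PySem.Int.floordiv rem k + 1) := by
  induction m with
  | zero =>
    intro ans rem k hk
    subst hk
    simp only [Nat.cast_zero, zero_add]
    rw [greedyLoop, dif_pos one_pos]
    rw [greedyLoop]
    simp [PySem.Int.floordiv, PySem.Int.mod]
  | succ m ih =>
    intro ans rem k hk
    have hkpos : 0 < k := by omega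
    have hk1 : (0:Int) < k - 1 := by omega
    set q := PySem.Int.floordiv rem k with hq
    set r := PySem.Int.mod rem k with hr
    have hr0 : 0 ≤ r := PySem.Int.mod_nonneg rem hkpos
    have hrk : r < k := PySem.Int.mod_lt rem hkpos
    have hsum : q * k + r = rem := PySem.Int.floordiv_mul_add_mod rem k
    have hrem' : rem - q = r + q * (k - 1) := by ring_nf; omega
    rw [greedyLoop, dif_pos hkpos]
    rw [ih (ans ++ [q]) (rem - q) (k - 1) (by omega)]
    by_cases hc : r < k - 1
    · -- next quotient stays q, next remainder stays r
      have hd : PySem.Int.floordiv (rem - q) (k - 1) = q := by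
        rw [PySem.Int.floordiv_eq_ediv_of_pos hk1, hrem',
            Int.add_mul_ediv_right r q (by omega : k - 1 ≠ 0),
            Int.ediv_eq_zero_of_lt hr0 hc]
        simp
      have hm : PySem.Int.mod (rem - q) (k - 1) = r := by
        rw [PySem.Int.mod_eq_emod_of_pos hk1, hrem', Int.add_mul_emod_self_right,
            Int.emod_eq_of_lt hr0 hc]
      rw [hd, hm]
      have h1 : (k - r).toNat = (k - 1 - r).toNat + 1 := by omega
      simp [h1, List.replicate_succ]
    · -- r = k - 1: next quotient is q + 1, remainder 0
      have hre : r = k - 1 := by omega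
      have hfac : rem - q = (q + 1) * (k - 1) := by rw [hrem', hre]; ring
      have hd : PySem.Int.floordiv (rem - q) (k - 1) = q + 1 := by
        rw [PySem.Int.floordiv_eq_ediv_of_pos hk1, hfac,
            Int.mul_ediv_cancel _ (by omega : k - 1 ≠ 0)]
      have hm : PySem.Int.mod (rem - q) (k - 1) = 0 := by
        rw [PySem.Int.mod_eq_emod_of_pos hk1, hfac, Int.mul_emod_left]
      rw [hd, hm]
      have h1 : (k - r).toNat = 1 := by omega
      simp [h1]
      omega

-- ===== VERDICT (by name: the statement is the Claim_ definition above) =====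
theorem solution_spec : Claim_equal_solution := by
  intro n s _ hpre
  unfold Spec_solution
  by_cases hns : n > s
  · unfold solution solution_alt; rw [if_pos hns, if_pos hns]
  · rcases lt_trichotomy n 0 with hn | hn | hn
    · -- n < 0: A's loops are empty, B's loop does not run
      have h1 : (PySem.Int.mod s n).toNat = 0 := by
        have := PySem.Int.mod_neg_bounds s hn; omega
      unfold solution solution_alt
      rw [if_neg hns, if_neg hns, PySem.List.pyRange_one_eq_nil (by omega), greedyLoop]
      simp [incLoop, h1, dif_neg (by omega : ¬ (0:Int) < n)]
    · exfalso
      rcases hpre with h | h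
      · exact h hn
      · omega
    · rw [solution_twoBlock n s hn hns]
      unfold solution_alt
      rw [if_neg hns, greedy_spec (n - 1).toNat [] s n (by omega), List.nil_append]
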